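-- pv_equiv track=rewrite | github.com/mohammadfaiizan/ProjectI | DSA/Problem/Dynamic Programming/05_String_DP/115_Distinct_Subsequences.py | num_distinct_with_paths
-- ===== SOURCE A (Python) =====
-- def num_distinct_with_paths(s, t):
--     """
--     FIND ACTUAL SUBSEQUENCE PATHS:
--     ==============================
--     Return count and show some actual subsequences.
--
--     Time Complexity: O(m*n + k*L) where k is count and L is length
--     Space Complexity: O(m*n + k*L) - DP table + paths
--     """
--     m, n = len(s), len(t)
--
--     # Build DP table with path tracking
--     dp = [[0] * (n + 1) for _ in range(m + 1)]
--
--     # Base case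
--     for i in range(m + 1):
--         dp[i][0] = 1
--
--     # Fill DP table
--     for i in range(1, m + 1):
--         for j in range(1, n + 1):
--             dp[i][j] = dp[i - 1][j]
--             if s[i - 1] == t[j - 1]:
--                 dp[i][j] += dp[i - 1][j - 1]
--
--     # Find actual paths using backtracking
--     all_paths = []
--
--     def backtrack(i, j, current_indices):
--         if j == 0:
--             # Successfully formed target, record path
--             all_paths.append(current_indices[::-1])  # Reverse to get correct order
--             return
--
--         if i == 0:
--             return  # Can't form target with empty source
--
--         # If we skip current character
--         if dp[i - 1][j] > 0:
--             backtrack(i - 1, j, current_indices)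
--
--         # If we use current character (and it matches)
--         if s[i - 1] == t[j - 1] and dp[i - 1][j - 1] > 0:
--             current_indices.append(i - 1)
--             backtrack(i - 1, j - 1, current_indices)
--             current_indices.pop()
--
--     backtrack(m, n, [])
--
--     return dp[m][n], all_paths
-- ===== SOURCE B (Python) =====
-- def num_distinct_with_paths(s, t):
--     # E[j] = index matched for t[j] by the greedy leftmost embedding of t in s
--     E = []
--     j = 0
--     for i in range(len(s)):
--         if j < len(t) and s[i] == t[j]:
--             E.append(i)
--             j += 1
--
--     def go(pos, bound, acc):
--         if pos < 0:
--             return [acc]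
--         # prune: t[0:pos+1] embeds in s[0:bound] iff pos < len(E) and E[pos] < bound
--         if pos >= len(E) or E[pos] >= bound:
--             return []
--         out = []
--         for i in range(bound):
--             if s[i] == t[pos]:
--                 out += go(pos - 1, i, [i] + acc)
--         return out
--
--     paths = go(len(t) - 1, len(s), [])
--     return len(paths), paths
-- ===== Notes on version B (the rewrite author's own statement) =====
-- stated objective: alternative
-- what changed: Replaced the DP count table plus guarded backtracking over it by a table-free recursive enumeration of index paths (choosing the index of t's last remaining character ascending), pruned via a precomputed greedy leftmost-embedding index array instead of dp>0 guards.
import Mathlib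
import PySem

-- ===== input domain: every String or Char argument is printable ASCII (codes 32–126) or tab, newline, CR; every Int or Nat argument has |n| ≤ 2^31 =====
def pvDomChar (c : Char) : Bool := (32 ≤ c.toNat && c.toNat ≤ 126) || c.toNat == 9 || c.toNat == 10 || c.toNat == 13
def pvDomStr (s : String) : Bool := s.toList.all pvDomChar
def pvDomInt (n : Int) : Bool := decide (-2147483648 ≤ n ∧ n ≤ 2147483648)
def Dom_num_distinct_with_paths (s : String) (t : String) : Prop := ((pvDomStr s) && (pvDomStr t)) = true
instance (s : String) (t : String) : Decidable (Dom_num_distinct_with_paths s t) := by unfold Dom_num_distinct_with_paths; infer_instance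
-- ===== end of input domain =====

-- B replaces A's DP count table + guarded backtracking over it by a table-free
-- recursive enumeration of the embedding index paths, pruned by a two-pointer
-- subsequence feasibility check (alternative decomposition; same output, same order).

-- ===== PORT A =====
-- Row i of A's DP table, computed from row i-1 exactly as A's inner `for j` loop
-- does (row i reads only row i-1, and dp[i][0] = 1 from the base-case loop).
def pvFillRow (s t : List Char) (prev : List Int) (i : Nat) : List Int :=
  (List.range (t.length + 1)).map (fun j =>
    if j = 0 then (1 : Int)
    else prev.getD j 0 +
      (if s.getD (i - 1) 'a' = t.getD (j - 1) 'a' then prev.getD (j - 1) 0 else 0))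

def pvDpRow (s t : List Char) : Nat → List Int
  | 0 => (List.range (t.length + 1)).map (fun j => if j = 0 then (1 : Int) else 0)
  | i + 1 => pvFillRow s t (pvDpRow s t i) (i + 1)

-- dp[i][j]  (indices in the actual runs are always in range; defaults are never hit)
def pvDget (s t : List Char) (i j : Nat) : Int := (pvDpRow s t i).getD j 0

-- A's `backtrack(i, j, current_indices)`: the skip branch first, then the use
-- branch; a finished path is recorded as current_indices[::-1].
def pvBacktrack (s t : List Char) (i j : Nat) (cur : List Int) : List (List Int) :=
  if j = 0 then [cur.reverse]
  else if i = 0 then []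
  else
    (if 0 < pvDget s t (i - 1) j then pvBacktrack s t (i - 1) j cur else []) ++
    (if s.getD (i - 1) 'a' = t.getD (j - 1) 'a' ∧ 0 < pvDget s t (i - 1) (j - 1)
      then pvBacktrack s t (i - 1) (j - 1) (cur ++ [((i : Int) - 1)]) else [])
termination_by i
decreasing_by all_goals omega

def num_distinct_with_paths (s : String) (t : String) : Int × List (List Int) :=
  (pvDget s.toList t.toList s.toList.length t.toList.length,
   pvBacktrack s.toList t.toList s.toList.length t.toList.length [])

-- ===== PORT B =====
-- B first computes E, the index list of the greedy leftmost embedding of t in s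
-- (the single `for i in range(len(s))` two-pointer pass carrying j).
def pvGreedy (s t : List Char) : List Nat :=
  ((List.range s.length).foldl
    (fun st i =>
      if st.1 < t.length ∧ s.getD i 'a' = t.getD st.1 'a' then (st.1 + 1, st.2 ++ [i]) else st)
    ((0 : Nat), ([] : List Nat))).2

-- B's `go(pos, bound, acc)` with k = pos + 1 (k = 0 ↔ pos < 0): prune when
-- pos ≥ len(E) or E[pos] ≥ bound, else choose the index of t[pos] ascending.
def pvGoAlt (s t : List Char) (E : List Nat) : Nat → Nat → List Int → List (List Int)
  | 0, _, acc => [acc]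
  | k + 1, bound, acc =>
      match E[k]? with
      | none => []
      | some e =>
        if bound ≤ e then []
        else (List.range bound).flatMap (fun i =>
          if s.getD i 'a' = t.getD k 'a' then pvGoAlt s t E k i ((i : Int) :: acc) else [])

def num_distinct_with_paths_alt (s : String) (t : String) : Int × List (List Int) :=
  let E := pvGreedy s.toList t.toList
  let paths := pvGoAlt s.toList t.toList E t.toList.length s.toList.length []
  ((paths.length : Int), paths)

-- ===== PRECONDITION & SPEC =====
def Spec_num_distinct_with_paths (s : String) (t : String) (out : Int × List (List Int)) : Prop := out = num_distinct_with_paths_alt s t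
instance (s : String) (t : String) (out : Int × List (List Int)) : Decidable (Spec_num_distinct_with_paths s t out) := by unfold Spec_num_distinct_with_paths; infer_instance

-- ===== CLAIM (what is proved, stated in full; the proofs are below) =====
def Claim_equal_num_distinct_with_paths : Prop := ∀ (s : String) (t : String), Dom_num_distinct_with_paths s t → Spec_num_distinct_with_paths s t (num_distinct_with_paths s t)

-- ===== LEMMAS AND PROOFS =====

-- Proof-side auxiliary: B's enumeration WITHOUT the feasibility pruning.
def pvGo (s t : List Char) : Nat → Nat → List Int → List (List Int)
  | 0, _, acc => [acc]
  | k + 1, bound, acc =>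
      (List.range bound).flatMap (fun i =>
        if s.getD i 'a' = t.getD k 'a' then pvGo s t k i ((i : Int) :: acc) else [])

-- The accumulator only gets appended to every emitted path.
theorem pvGo_acc (s t : List Char) (k : Nat) : ∀ (b : Nat) (acc : List Int),
    pvGo s t k b acc = (pvGo s t k b []).map (· ++ acc) := by
  induction k with
  | zero => intro b acc; simp [pvGo]
  | succ k ih =>
    intro b acc
    simp only [pvGo, List.map_flatMap]
    apply List.flatMap_congr
    intro i _
    split_ifs with h
    · rw [ih i ((i : Int) :: acc), ih i ((i : Int) :: [])]
      simp [List.map_map, Function.comp_def]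
    · simp

theorem pvGo_len (s t : List Char) (k b : Nat) (acc : List Int) :
    (pvGo s t k b acc).length = (pvGo s t k b []).length := by
  rw [pvGo_acc]; simp

theorem getD_map_range (n j : Nat) (f : Nat → Int) (h : j < n) :
    ((List.range n).map f).getD j (0 : Int) = f j := by
  simp [List.getD_eq_getElem?_getD, h]

-- The DP entry dp[i][j] counts the paths the enumeration emits.
theorem pvDget_eq (s t : List Char) : ∀ (i j : Nat), j ≤ t.length →
    pvDget s t i j = ((pvGo s t j i []).length : Int) := by
  intro i
  induction i with
  | zero =>
    intro j hj
    cases j with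
    | zero => simp [pvDget, pvDpRow, pvGo]
    | succ k =>
      rw [pvDget, pvDpRow, getD_map_range _ _ _ (by omega)]
      simp [pvGo]
  | succ b ih =>
    intro j hj
    cases j with
    | zero => simp [pvDget, pvDpRow, pvFillRow, pvGo]
    | succ k =>
      rw [pvDget, pvDpRow, pvFillRow, getD_map_range _ _ _ (by omega)]
      have h1 : (pvDpRow s t b).getD (k + 1) 0 = ((pvGo s t (k + 1) b []).length : Int) :=
        ih (k + 1) hj
      have h2 : (pvDpRow s t b).getD k 0 = ((pvGo s t k b []).length : Int) :=
        ih k (by omega)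
      have hsplit : pvGo s t (k + 1) (b + 1) [] = pvGo s t (k + 1) b [] ++
          (if s.getD b 'a' = t.getD k 'a' then pvGo s t k b [(b : Int)] else []) := by
        simp only [pvGo, List.range_succ, List.flatMap_append, List.flatMap_cons,
          List.flatMap_nil, List.append_nil]
      rw [if_neg (by omega : ¬ k + 1 = 0)]
      simp only [Nat.add_sub_cancel]
      rw [h1, h2, hsplit, List.length_append]
      split_ifs with h
      · rw [pvGo_len s t k b [(b : Int)]]; push_cast; ring
      · simp

-- The two-pointer fold reaches u.length exactly when u (from j) embeds in v.
theorem pvFoldSub (u : List Char) : ∀ (v : List Char) (j : Nat), j ≤ u.length →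
    ((v.foldl (fun j c => if j < u.length ∧ c = u.getD j 'a' then j + 1 else j) j
        = u.length) ↔ (u.drop j).Sublist v) := by
  intro v
  induction v with
  | nil =>
    intro j hj
    simp only [List.foldl_nil, List.sublist_nil, List.drop_eq_nil_iff]
    omega
  | cons a v ihv =>
    intro j hj
    simp only [List.foldl_cons]
    by_cases h : j < u.length ∧ a = u.getD j 'a'
    · rw [if_pos h, ihv (j + 1) (by omega)]
      have hda : u[j] = a := by
        have h2 := h.2
        simp [List.getD_eq_getElem?_getD, List.getElem?_eq_getElem h.1] at h2
        exact h2.symm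
      have hd : u.drop j = a :: u.drop (j + 1) := by
        rw [List.drop_eq_getElem_cons h.1, hda]
      rw [hd, List.cons_sublist_cons]
    · rw [if_neg h, ihv j hj]
      by_cases hj' : j < u.length
      · have hne : a ≠ u.getD j 'a' := fun he => h ⟨hj', he⟩
        have hd : u.drop j = u[j] :: u.drop (j + 1) := List.drop_eq_getElem_cons hj'
        rw [hd, List.sublist_cons_iff]
        constructor
        · exact Or.inl
        · rintro (h' | ⟨r, hr, -⟩)
          · exact h'
          · exfalso
            apply hne
            have : u[j] = a := (List.cons.injEq _ _ _ _ ▸ hr).1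
            simp [List.getD_eq_getElem?_getD, List.getElem?_eq_getElem hj', this]
      · have hnil : u.drop j = [] := by rw [List.drop_eq_nil_iff]; omega
        simp [hnil, List.nil_sublist]

-- Proof-side: the t-directed two-pointer fold with cap m, started at state j.
def pvFc (t : List Char) (m : Nat) (v : List Char) (j : Nat) : Nat :=
  v.foldl (fun j c => if j < m ∧ c = t.getD j 'a' then j + 1 else j) j

theorem pvFc_append (t : List Char) (m : Nat) (v w : List Char) (j : Nat) :
    pvFc t m (v ++ w) j = pvFc t m w (pvFc t m v j) := by
  unfold pvFc; rw [List.foldl_append]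

theorem pvFc_cons (t : List Char) (m : Nat) (c : Char) (v : List Char) (j : Nat) :
    pvFc t m (c :: v) j = pvFc t m v (if j < m ∧ c = t.getD j 'a' then j + 1 else j) := rfl

theorem pvFc_stick (t : List Char) (m : Nat) : ∀ (v : List Char), pvFc t m v m = m := by
  intro v
  induction v with
  | nil => rfl
  | cons c v ih =>
    rw [pvFc_cons, if_neg (fun h => absurd h.1 (Nat.lt_irrefl m))]
    exact ih

theorem pvFc_le (t : List Char) (m : Nat) : ∀ (v : List Char) (j : Nat), j ≤ pvFc t m v j := by
  intro v
  induction v with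
  | nil => intro j; exact Nat.le_refl j
  | cons c v ih =>
    intro j
    rw [pvFc_cons]
    split_ifs with h
    · exact Nat.le_trans (Nat.le_succ j) (ih (j + 1))
    · exact ih j

-- Capping at m ≤ M just truncates the uncapped run.
theorem pvFc_min (t : List Char) (m M : Nat) (hmM : m ≤ M) : ∀ (v : List Char) (j : Nat),
    j ≤ m → pvFc t m v j = min m (pvFc t M v j) := by
  intro v
  induction v with
  | nil => intro j hj; unfold pvFc; simp [Nat.min_eq_right hj]
  | cons c v ih =>
    intro j hj
    rw [pvFc_cons, pvFc_cons]
    by_cases hc : j < m ∧ c = t.getD j 'a'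
    · rw [if_pos hc, if_pos ⟨by omega, hc.2⟩]
      exact ih (j + 1) (by omega)
    · rw [if_neg hc]
      by_cases hjm : j < m
      · rw [if_neg (fun h => hc ⟨hjm, h.2⟩)]
        exact ih j hj
      · have hje : j = m := by omega
        have h1 : pvFc t m v j = j := by rw [hje]; exact pvFc_stick t m v
        have h2 : j ≤ pvFc t M v (if j < M ∧ c = t.getD j 'a' then j + 1 else j) := by
          split_ifs with h
          · exact Nat.le_trans (Nat.le_succ j) (pvFc_le t M v (j + 1))
          · exact pvFc_le t M v j
        omega

-- The capped fold reaches its cap exactly when the t-prefix embeds in v.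
theorem pvFc_cap_iff (t : List Char) (k : Nat) (hk : k < t.length) (v : List Char) :
    pvFc t (k + 1) v 0 = k + 1 ↔ (t.take (k + 1)).Sublist v := by
  have hu : (t.take (k + 1)).length = k + 1 := by simp; omega
  have hfun : (fun (j : Nat) (c : Char) => if j < k + 1 ∧ c = t.getD j 'a' then j + 1 else j)
      = (fun (j : Nat) (c : Char) =>
          if j < (t.take (k + 1)).length ∧ c = (t.take (k + 1)).getD j 'a' then j + 1 else j) := by
    funext j c
    by_cases hjk : j < k + 1
    · have hjt : j < t.length := by omega
      have hget : (t.take (k + 1)).getD j 'a' = t.getD j 'a' := by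
        simp [List.getD_eq_getElem?_getD, hjk]
      simp [hjk, hu, List.getD_eq_getElem?_getD, List.getElem?_eq_getElem hjt]
    · simp [hjk, hu]
  unfold pvFc
  rw [hfun]
  have h := pvFoldSub (t.take (k + 1)) v 0 (Nat.zero_le _)
  rw [List.drop_zero, hu] at h
  rw [hu]
  exact h

-- Hence the t-prefix embeds in v iff the uncapped run gets past k.
theorem pvFc_sub_iff (t : List Char) (k : Nat) (hk : k < t.length) (v : List Char) :
    (t.take (k + 1)).Sublist v ↔ k + 1 ≤ pvFc t t.length v 0 := by
  rw [← pvFc_cap_iff t k hk v, pvFc_min t (k + 1) t.length (by omega) v 0 (by omega)]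
  omega

-- The greedy pair fold over the first b indices of s (pvGreedy is its .2 at b = |s|).
def pvGr (s t : List Char) (b : Nat) : Nat × List Nat :=
  (List.range b).foldl
    (fun st i =>
      if st.1 < t.length ∧ s.getD i 'a' = t.getD st.1 'a' then (st.1 + 1, st.2 ++ [i]) else st)
    ((0 : Nat), ([] : List Nat))

-- Invariant of the greedy pass: the counter is the two-pointer run over the
-- prefix, and the p-th recorded index e is where that run steps from p to p+1.
theorem pvGr_inv (s t : List Char) : ∀ (b : Nat), b ≤ s.length →
    (pvGr s t b).1 = pvFc t t.length (s.take b) 0 ∧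
    (pvGr s t b).2.length = (pvGr s t b).1 ∧
    (∀ (p e : Nat), (pvGr s t b).2[p]? = some e →
      e < b ∧ pvFc t t.length (s.take e) 0 = p ∧ pvFc t t.length (s.take (e + 1)) 0 = p + 1) := by
  intro b
  induction b with
  | zero =>
    intro _
    refine ⟨rfl, rfl, ?_⟩
    intro p e he
    simp [pvGr] at he
  | succ b ih =>
    intro hb
    have hblt : b < s.length := hb
    obtain ⟨ih1, ih2, ih3⟩ := ih (by omega)
    have hstep : pvGr s t (b + 1) =
        (if (pvGr s t b).1 < t.length ∧ s.getD b 'a' = t.getD (pvGr s t b).1 'a'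
          then ((pvGr s t b).1 + 1, (pvGr s t b).2 ++ [b]) else pvGr s t b) := by
      unfold pvGr
      rw [List.range_succ, List.foldl_append]
      rfl
    have htk : s.take (b + 1) = s.take b ++ [s[b]] := by
      rw [List.take_add_one, List.getElem?_eq_getElem hblt]; rfl
    have hgd : s.getD b 'a' = s[b] := by
      simp [List.getD_eq_getElem?_getD, List.getElem?_eq_getElem hblt]
    have hfc : pvFc t t.length (s.take (b + 1)) 0 =
        (if pvFc t t.length (s.take b) 0 < t.length ∧
            s[b] = t.getD (pvFc t t.length (s.take b) 0) 'a'
          then pvFc t t.length (s.take b) 0 + 1 else pvFc t t.length (s.take b) 0) := by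
      rw [htk, pvFc_append]
      rfl
    by_cases hc : (pvGr s t b).1 < t.length ∧ s.getD b 'a' = t.getD (pvGr s t b).1 'a'
    · have hc' : pvFc t t.length (s.take b) 0 < t.length ∧
          s[b] = t.getD (pvFc t t.length (s.take b) 0) 'a' := by
        rw [← ih1, ← hgd]; exact hc
      rw [if_pos hc] at hstep
      rw [if_pos hc'] at hfc
      refine ⟨by rw [hstep, hfc, ih1], by rw [hstep]; simp [ih2], ?_⟩
      intro p e he
      rw [hstep] at he
      by_cases hp : p < (pvGr s t b).2.length
      · rw [List.getElem?_append_left hp] at he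
        obtain ⟨he1, he2, he3⟩ := ih3 p e he
        exact ⟨by omega, he2, he3⟩
      · rw [List.getElem?_append_right (by omega)] at he
        have hp0 : p - (pvGr s t b).2.length = 0 := by
          by_contra hne
          rw [List.getElem?_eq_none_iff.mpr (by simp; omega)] at he
          simp at he
        have hpe : p = (pvGr s t b).2.length := by omega
        have hee : e = b := by
          rw [hp0] at he
          simpa using he.symm
        subst hee
        refine ⟨by omega, ?_, ?_⟩
        · rw [hpe, ih2, ih1]
        · rw [hfc, hpe, ih2, ih1]
    · have hc' : ¬ (pvFc t t.length (s.take b) 0 < t.length ∧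
          s[b] = t.getD (pvFc t t.length (s.take b) 0) 'a') := by
        rw [← ih1, ← hgd]; exact hc
      rw [if_neg hc] at hstep
      rw [if_neg hc'] at hfc
      refine ⟨by rw [hstep, hfc, ih1], by rw [hstep]; exact ih2, ?_⟩
      intro p e he
      rw [hstep] at he
      obtain ⟨he1, he2, he3⟩ := ih3 p e he
      exact ⟨by omega, he2, he3⟩

-- B's O(1) guard decides the subsequence relation on the prefixes.
theorem pvGuard_iff (s t : List Char) (k b : Nat) (hk : k < t.length) (hb : b ≤ s.length) :
    (∃ e, (pvGreedy s t)[k]? = some e ∧ e < b) ↔ (t.take (k + 1)).Sublist (s.take b) := by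
  obtain ⟨g1, g2, g3⟩ := pvGr_inv s t s.length le_rfl
  have hE : pvGreedy s t = (pvGr s t s.length).2 := rfl
  constructor
  · rintro ⟨e, he, heb⟩
    rw [hE] at he
    obtain ⟨he1, he2, he3⟩ := g3 k e he
    rw [pvFc_sub_iff t k hk]
    have hsplit : s.take b = s.take (e + 1) ++ (s.drop (e + 1)).take (b - (e + 1)) := by
      rw [← List.take_add]; congr 1; omega
    rw [hsplit, pvFc_append, he3]
    exact pvFc_le t t.length _ (k + 1)
  · intro hsub
    have hkb : k + 1 ≤ pvFc t t.length (s.take b) 0 := (pvFc_sub_iff t k hk _).mp hsub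
    have hfull : pvFc t t.length (s.take b) 0 ≤ pvFc t t.length (s.take s.length) 0 := by
      have hsplit : s.take s.length = s.take b ++ (s.drop b).take (s.length - b) := by
        rw [← List.take_add]; congr 1; omega
      rw [hsplit, pvFc_append]
      exact pvFc_le t t.length _ _
    have hlen : k < (pvGr s t s.length).2.length := by omega
    obtain ⟨e, he⟩ : ∃ e, (pvGr s t s.length).2[k]? = some e :=
      ⟨_, List.getElem?_eq_getElem hlen⟩
    obtain ⟨he1, he2, he3⟩ := g3 k e he
    refine ⟨e, by rw [hE]; exact he, ?_⟩
    by_contra hbe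
    have hbse : b ≤ e := by omega
    have : k + 1 ≤ pvFc t t.length (s.take e) 0 := by
      have hsplit : s.take e = s.take b ++ (s.drop b).take (e - b) := by
        rw [← List.take_add]; congr 1; omega
      rw [hsplit, pvFc_append]
      exact Nat.le_trans hkb (pvFc_le t t.length _ _)
    omega

-- A nonempty enumeration yields an embedding of the t-prefix in the s-prefix.
theorem pvGo_ne_sublist (s t : List Char) : ∀ (k : Nat), k ≤ t.length → ∀ (b : Nat), b ≤ s.length →
    pvGo s t k b [] ≠ [] → (t.take k).Sublist (s.take b) := by
  intro k
  induction k with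
  | zero => intro _ b _ _; simp
  | succ k ih =>
    intro hk b hb hne
    have hex : ∃ i ∈ List.range b,
        (if s.getD i 'a' = t.getD k 'a' then pvGo s t k i [(i : Int)] else []) ≠ [] := by
      by_contra hall
      push Not at hall
      apply hne
      simp only [pvGo]
      rw [List.flatMap_eq_nil_iff]
      exact hall
    obtain ⟨i, hi, hbr⟩ := hex
    rw [List.mem_range] at hi
    have hmatch : s.getD i 'a' = t.getD k 'a' := by
      by_contra hm; rw [if_neg hm] at hbr; exact hbr rfl
    rw [if_pos hmatch] at hbr
    have hne' : pvGo s t k i [] ≠ [] := by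
      intro h0; apply hbr; rw [pvGo_acc, h0]; rfl
    have hsub := ih (by omega) i (by omega) hne'
    have hkt : k < t.length := hk
    have his : i < s.length := by omega
    have h1 : t.take (k + 1) = t.take k ++ [t[k]] := by
      rw [List.take_add_one, List.getElem?_eq_getElem hkt]; rfl
    have h2 : s.take (i + 1) = s.take i ++ [s[i]] := by
      rw [List.take_add_one, List.getElem?_eq_getElem his]; rfl
    have heq : t[k] = s[i] := by
      have hm := hmatch
      simp [List.getD_eq_getElem?_getD, List.getElem?_eq_getElem hkt,
        List.getElem?_eq_getElem his] at hm
      exact hm.symm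
    have hstep : (t.take (k + 1)).Sublist (s.take (i + 1)) := by
      rw [h1, h2, heq]
      exact hsub.append (List.Sublist.refl _)
    have hmono : (s.take (i + 1)).Sublist (s.take b) := by
      have hdec : s.take b = s.take (i + 1) ++ (s.drop (i + 1)).take (b - (i + 1)) := by
        rw [← List.take_add]; congr 1; omega
      rw [hdec]
      exact List.sublist_append_left _ _
    exact hstep.trans hmono

-- The pruning is sound: the pruned and unpruned enumerations agree.
theorem pvGoAlt_eq (s t : List Char) : ∀ (k : Nat), k ≤ t.length → ∀ (b : Nat), b ≤ s.length →
    ∀ (acc : List Int), pvGoAlt s t (pvGreedy s t) k b acc = pvGo s t k b acc := by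
  intro k
  induction k with
  | zero => intro _ b _ acc; simp [pvGoAlt, pvGo]
  | succ k ih =>
    intro hk b hb acc
    have hnil : (∀ e, (pvGreedy s t)[k]? = some e → b ≤ e) →
        pvGo s t (k + 1) b acc = [] := by
      intro hfail
      have hempty : pvGo s t (k + 1) b [] = [] := by
        by_contra hne
        obtain ⟨e, he, heb⟩ := (pvGuard_iff s t k b hk hb).mpr
          (pvGo_ne_sublist s t (k + 1) hk b hb hne)
        exact absurd (hfail e he) (by omega)
      rw [pvGo_acc, hempty]
      rfl
    cases hE : (pvGreedy s t)[k]? with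
    | none =>
      have hL : pvGoAlt s t (pvGreedy s t) (k + 1) b acc = [] := by
        simp only [pvGoAlt, hE]
      rw [hL]
      refine (hnil ?_).symm
      intro e' he'
      rw [hE] at he'
      simp at he'
    | some e =>
      by_cases hbe : b ≤ e
      · have hL : pvGoAlt s t (pvGreedy s t) (k + 1) b acc = [] := by
          simp only [pvGoAlt, hE, if_pos hbe]
        rw [hL]
        refine (hnil ?_).symm
        intro e' he'
        rw [hE] at he'
        cases he'
        exact hbe
      · have hL : pvGoAlt s t (pvGreedy s t) (k + 1) b acc =
            (List.range b).flatMap (fun i =>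
              if s.getD i 'a' = t.getD k 'a' then pvGoAlt s t (pvGreedy s t) k i ((i : Int) :: acc)
              else []) := by
          simp only [pvGoAlt, hE, if_neg hbe]
        rw [hL]
        simp only [pvGo]
        apply List.flatMap_congr
        intro i hi
        rw [List.mem_range] at hi
        split_ifs with h
        · exact ih (by omega) i (by omega) _
        · rfl

-- A's guarded backtracking emits exactly the enumeration (the dp guards are
-- redundant: a zero DP entry means the corresponding sub-enumeration is empty).
theorem pvBacktrack_eq (s t : List Char) : ∀ (i j : Nat) (cur : List Int), j ≤ t.length →
    pvBacktrack s t i j cur = pvGo s t j i cur.reverse := by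
  intro i
  induction i with
  | zero =>
    intro j cur hj
    cases j with
    | zero => simp [pvBacktrack, pvGo]
    | succ k => rw [pvBacktrack]; simp [pvGo]
  | succ b ih =>
    intro j cur hj
    cases j with
    | zero => simp [pvBacktrack, pvGo]
    | succ k =>
      rw [pvBacktrack]
      simp only [Nat.add_sub_cancel, Nat.succ_ne_zero, if_false, Nat.cast_add,
        Nat.cast_one, add_sub_cancel_right]
      have hrhs : pvGo s t (k + 1) (b + 1) cur.reverse =
          pvGo s t (k + 1) b cur.reverse ++
          (if s.getD b 'a' = t.getD k 'a' then pvGo s t k b ((b : Int) :: cur.reverse) else []) := by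
        simp only [pvGo, List.range_succ, List.flatMap_append, List.flatMap_cons,
          List.flatMap_nil, List.append_nil]
      rw [hrhs]
      have hzero1 : ¬ 0 < pvDget s t b (k + 1) → pvGo s t (k + 1) b cur.reverse = [] := by
        intro h
        have := pvDget_eq s t b (k + 1) hj
        have hl : (pvGo s t (k + 1) b []).length = 0 := by omega
        rw [pvGo_acc]
        rw [List.length_eq_zero_iff] at hl
        simp [hl]
      have hzero2 : ¬ 0 < pvDget s t b k → pvGo s t k b ((b : Int) :: cur.reverse) = [] := by
        intro h
        have := pvDget_eq s t b k (by omega)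
        have hl : (pvGo s t k b []).length = 0 := by omega
        rw [pvGo_acc]
        rw [List.length_eq_zero_iff] at hl
        simp [hl]
      congr 1
      · by_cases h1 : 0 < pvDget s t b (k + 1)
        · rw [if_pos h1, ih (k + 1) cur hj]
        · rw [if_neg h1, hzero1 h1]
      · by_cases hm : s.getD b 'a' = t.getD k 'a'
        · by_cases h2 : 0 < pvDget s t b k
          · rw [if_pos ⟨hm, h2⟩, if_pos hm, ih k (cur ++ [(b : Int)]) (by omega)]
            simp
          · rw [if_neg (by tauto), if_pos hm, hzero2 h2]
        · rw [if_neg (by tauto), if_neg hm]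

-- ===== VERDICT (by name: the statement is the Claim_ definition above) =====
theorem num_distinct_with_paths_spec : Claim_equal_num_distinct_with_paths := by
  intro s t _
  unfold Spec_num_distinct_with_paths num_distinct_with_paths
  rw [show num_distinct_with_paths_alt s t =
      (((pvGoAlt s.toList t.toList (pvGreedy s.toList t.toList)
          t.toList.length s.toList.length []).length : Int),
        pvGoAlt s.toList t.toList (pvGreedy s.toList t.toList)
          t.toList.length s.toList.length []) from rfl,
    pvGoAlt_eq s.toList t.toList t.toList.length le_rfl s.toList.length le_rfl,
    pvDget_eq s.toList t.toList s.toList.length t.toList.length le_rfl,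
    pvBacktrack_eq s.toList t.toList s.toList.length t.toList.length [] le_rfl]
  rfl
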